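-- pv_equiv track=rewrite | github.com/thealper2/codewars-solutions | 7-kyu/party_people.py | party_people
-- ===== SOURCE A (Python) =====
-- def party_people(lst):
--     changed = True
--     while changed:
--         changed = False
--         n = len(lst)
--         new_lst = [x for x in lst if x <= n]
--         if len(new_lst) != n:
--             changed = True
--             lst = new_lst
--
--     return len(lst)
-- ===== SOURCE B (Python) =====
-- def party_people(lst):
--     # Sort once, then one backward scan: the answer is the greatest k with at
--     # least k elements <= k, i.e. the greatest k with s[k-1] <= k (or k == 0).
--     s = sorted(lst)
--     k = len(s)
--     while k > 0 and s[k - 1] > k: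
--         k -= 1
--     return k
-- ===== Notes on version B (the rewrite author's own statement) =====
-- stated objective: alternative
-- what changed: A repeatedly rebuilds the list, filtering out elements exceeding its current length until stable; B sorts once and does a single backward scan for the greatest k with s[k-1] <= k (the greatest k with at least k elements <= k), which is exactly the loop's fixed point.
import Mathlib
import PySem

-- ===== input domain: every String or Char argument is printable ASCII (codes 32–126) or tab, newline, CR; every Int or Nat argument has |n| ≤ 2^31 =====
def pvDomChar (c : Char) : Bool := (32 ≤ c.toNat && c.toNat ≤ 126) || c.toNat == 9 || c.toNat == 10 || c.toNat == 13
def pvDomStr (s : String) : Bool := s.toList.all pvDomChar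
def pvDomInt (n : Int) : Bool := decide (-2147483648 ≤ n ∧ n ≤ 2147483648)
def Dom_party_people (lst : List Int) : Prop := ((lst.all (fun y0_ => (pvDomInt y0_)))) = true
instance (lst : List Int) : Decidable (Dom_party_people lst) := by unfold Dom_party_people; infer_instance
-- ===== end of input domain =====

-- B replaces A's repeated list-filtering loop by one sort plus a single backward scan
-- for the greatest k with s[k-1] <= k (objective: alternative algorithm, same measured cost).

-- ===== PORT A =====
-- A's while-loop: each pass filters the list by its current length; the loop body
-- re-runs exactly when the filter shrank the list, so it is the recursion below.
-- the comprehension [x for x in lst if x <= n] with n = len(lst)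
def keepLe (l : List Int) : List Int := l.filter (fun x => decide (x ≤ (l.length : Int)))

def partyAux (l : List Int) : Int :=
  if ((keepLe l).length : Int) ≠ (l.length : Int) then partyAux (keepLe l) else (l.length : Int)
termination_by l.length
decreasing_by
  have := List.length_filter_le (fun x => decide (x ≤ (l.length : Int))) l
  unfold keepLe at *
  omega

def party_people (lst : List Int) : Int := partyAux lst

-- ===== PORT B =====
-- the while-loop of Source B: decrement k while k > 0 and s[k-1] > k.
-- (the index k-1 is always in range in Source B since 0 < k ≤ len(s), so getD is exact)
def partyScan (s : List Int) (k : Nat) : Nat :=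
  if 0 < k ∧ (k : Int) < s.getD (k - 1) 0 then partyScan s (k - 1) else k
termination_by k
decreasing_by omega

def party_people_alt (lst : List Int) : Int :=
  let s := PySem.List.sorted lst (fun x => x) false
  (partyScan s s.length : Int)

-- ===== PRECONDITION & SPEC =====
def Spec_party_people (lst : List Int) (out : Int) : Prop := out = party_people_alt lst
instance (lst : List Int) (out : Int) : Decidable (Spec_party_people lst out) := by unfold Spec_party_people; infer_instance

-- ===== CLAIM (what is proved, stated in full; the proofs are below) =====
def Claim_equal_party_people : Prop := ∀ (lst : List Int), Dom_party_people lst → Spec_party_people lst (party_people lst)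

-- ===== LEMMAS AND PROOFS =====

-- cnt l k = number of elements of l that are ≤ k
def cnt (l : List Int) (k : Nat) : Nat := l.countP (fun x => decide (x ≤ (k : Int)))

theorem cnt_mono (l : List Int) {j k : Nat} (h : j ≤ k) : cnt l j ≤ cnt l k := by
  apply List.countP_mono_left
  intro x _ hx
  simp only [decide_eq_true_eq] at *
  omega

theorem cnt_filter (l : List Int) (n : Int) (k : Nat) (hk : (k : Int) ≤ n) :
    cnt (l.filter (fun x => decide (x ≤ n))) k = cnt l k := by
  unfold cnt
  rw [List.countP_filter]
  have hpt : ∀ a : Int, (decide (a ≤ (k : Int)) && decide (a ≤ n)) = decide (a ≤ (k : Int)) := by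
    intro a
    by_cases h : a ≤ (k : Int)
    · simp [h, le_trans h hk]
    · simp [h]
  simp only [hpt]

theorem findGreatest_drop {P : Nat → Prop} [DecidablePred P] {a b : Nat} (hab : a ≤ b)
    (h : ∀ k, a < k → k ≤ b → ¬P k) : Nat.findGreatest P b = Nat.findGreatest P a := by
  induction b with
  | zero =>
    have : a = 0 := by omega
    rw [this]
  | succ m ih =>
    rcases Nat.eq_or_lt_of_le hab with he | hlt
    · rw [he]
    · rw [Nat.findGreatest_of_not (h (m + 1) hlt le_rfl)]
      exact ih (by omega) (fun k hk1 hk2 => h k hk1 (by omega))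

theorem findGreatest_congr {P Q : Nat → Prop} [DecidablePred P] [DecidablePred Q] (b : Nat)
    (h : ∀ k, k ≤ b → (P k ↔ Q k)) : Nat.findGreatest P b = Nat.findGreatest Q b := by
  induction b with
  | zero => simp
  | succ m ih =>
    rw [Nat.findGreatest_succ, Nat.findGreatest_succ, if_congr (h _ le_rfl) rfl
      (ih (fun k hk => h k (by omega)))]

-- A's recursion computes the greatest k ≤ len with at least k elements ≤ k
theorem partyAux_eq (l : List Int) :
    partyAux l = ((Nat.findGreatest (fun k => k ≤ cnt l k) l.length : Nat) : Int) := by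
  induction hN : l.length using Nat.strong_induction_on generalizing l with
  | _ N ih =>
  subst hN
  rw [partyAux]
  by_cases hch : (((keepLe l)).length : Int) ≠ (l.length : Int)
  · rw [if_pos hch]
    set newL := keepLe l with hnew
    rw [keepLe] at hnew
    have hlt : newL.length < l.length := by
      have := List.length_filter_le (fun x => decide (x ≤ (l.length : Int))) l
      rw [← hnew] at this
      omega
    have hcntn : cnt l l.length = newL.length := by
      unfold cnt
      rw [hnew, List.countP_eq_length_filter]
    rw [ih newL.length hlt newL rfl]
    congr 1
    calc Nat.findGreatest (fun k => k ≤ cnt newL k) newL.length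
        = Nat.findGreatest (fun k => k ≤ cnt l k) newL.length := by
          apply findGreatest_congr
          intro k hk
          rw [hnew, cnt_filter l (l.length : Int) k (by exact_mod_cast Nat.le_of_lt (lt_of_le_of_lt hk hlt))]
      _ = Nat.findGreatest (fun k => k ≤ cnt l k) l.length := by
          refine (findGreatest_drop (le_of_lt hlt) ?_).symm
          intro k hk1 hk2 hP
          have : cnt l k ≤ cnt l l.length := cnt_mono l hk2
          omega
  · rw [if_neg hch]
    rw [ne_eq, not_not] at hch
    have hlen : (l.filter (fun x => decide (x ≤ (l.length : Int)))).length = l.length := by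
      rw [keepLe] at hch
      exact_mod_cast hch
    have hP : l.length ≤ cnt l l.length := by
      unfold cnt
      rw [List.countP_eq_length_filter, hlen]
    rw [Nat.findGreatest_eq (P := fun k => k ≤ cnt l k) hP]

-- the sorted-list bridge: "at least j elements ≤ j" ⟺ "the j-th smallest is ≤ j"
theorem cnt_sorted_iff (lst : List Int) (j : Nat) (hj1 : 0 < j) (hjn : j ≤ lst.length) :
    (j ≤ cnt lst j) ↔ (PySem.List.sorted lst (fun x => x) false).getD (j - 1) 0 ≤ (j : Int) := by
  set s := PySem.List.sorted lst (fun x => x) false with hs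
  have hlen : s.length = lst.length := PySem.List.length_sorted lst (fun x => x) false
  have hidx : j - 1 < s.length := by omega
  have hcnt : cnt lst j = cnt s j := (List.Perm.countP_eq _ (PySem.List.sorted_perm lst (fun x => x) false)).symm
  rw [List.getD_eq_getElem s 0 hidx, hcnt]
  constructor
  · intro hge
    by_contra hgt
    rw [not_le] at hgt
    have hsplit : cnt s j = List.countP (fun x => decide (x ≤ (j : Int))) (s.take (j - 1))
        + List.countP (fun x => decide (x ≤ (j : Int))) (s.drop (j - 1)) := by
      unfold cnt
      rw [← List.countP_append, List.take_append_drop]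
    have hdrop : List.countP (fun x => decide (x ≤ (j : Int))) (s.drop (j - 1)) = 0 := by
      rw [List.countP_eq_zero]
      intro a ha
      rw [List.mem_iff_getElem] at ha
      obtain ⟨i, hi, rfl⟩ := ha
      rw [List.length_drop] at hi
      have hi' : j - 1 + i < s.length := by omega
      rw [List.getElem_drop]
      have hmono : s[j - 1] ≤ s[j - 1 + i] :=
        PySem.List.sorted_id_getElem_mono lst (Nat.le_add_right _ _) hi'
      simp only [decide_eq_true_eq]
      omega
    have htake : List.countP (fun x => decide (x ≤ (j : Int))) (s.take (j - 1)) ≤ j - 1 := by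
      calc List.countP (fun x => decide (x ≤ (j : Int))) (s.take (j - 1))
          ≤ (s.take (j - 1)).length := List.countP_le_length
        _ ≤ j - 1 := by rw [List.length_take]; omega
    omega
  · intro hle
    have htake : List.countP (fun x => decide (x ≤ (j : Int))) (s.take j) = j := by
      have hall : ∀ a ∈ s.take j, (fun x => decide (x ≤ (j : Int))) a = true := by
        intro a ha
        rw [List.mem_iff_getElem] at ha
        obtain ⟨i, hi, rfl⟩ := ha
        rw [List.length_take] at hi
        have hi' : i < s.length := by omega
        rw [List.getElem_take]
        have hmono : s[i] ≤ s[j - 1] :=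
          PySem.List.sorted_id_getElem_mono lst (by omega) hidx
        simp only [decide_eq_true_eq]
        omega
      rw [List.countP_eq_length.mpr hall, List.length_take]
      omega
    have : cnt s j = List.countP (fun x => decide (x ≤ (j : Int))) (s.take j)
        + List.countP (fun x => decide (x ≤ (j : Int))) (s.drop j) := by
      unfold cnt
      rw [← List.countP_append, List.take_append_drop]
    omega

-- B's scan computes the same greatest k
theorem partyScan_eq (lst : List Int) (k : Nat) (hk : k ≤ lst.length) :
    partyScan (PySem.List.sorted lst (fun x => x) false) k
      = Nat.findGreatest (fun j => j ≤ cnt lst j) k := by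
  induction k with
  | zero => rw [partyScan]; simp
  | succ m ih =>
    rw [partyScan, Nat.findGreatest_succ]
    have hbr : (0 < m + 1 ∧ ((m + 1 : Nat) : Int) < (PySem.List.sorted lst (fun x => x) false).getD (m + 1 - 1) 0)
        ↔ ¬ (m + 1 ≤ cnt lst (m + 1)) := by
      rw [cnt_sorted_iff lst (m + 1) (by omega) hk]
      constructor
      · intro ⟨_, h⟩ hle; omega
      · intro h; exact ⟨by omega, by omega⟩
    by_cases hP : m + 1 ≤ cnt lst (m + 1)
    · rw [if_neg (by rw [hbr]; omega), if_pos hP]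
    · rw [if_pos (hbr.mpr hP), if_neg hP]
      exact ih (by omega)

-- ===== VERDICT (by name: the statement is the Claim_ definition above) =====
theorem party_people_spec : Claim_equal_party_people := by
  intro lst _
  unfold Spec_party_people party_people party_people_alt
  simp only []
  rw [partyAux_eq, PySem.List.length_sorted, partyScan_eq lst lst.length le_rfl]
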